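-- pv_equiv track=rewrite | github.com/kssumin/algorithm-study | season3/week3/loopy/13144_1.py | makeValue
-- ===== SOURCE A (Python) =====
-- def makeValue(arr, i):
--     returnValue = set()
--     for a in range(len(arr) - i + 1):
--         sumValue = 0
--         for j in range(i):
--             sumValue += (10 ** j) * arr[a + j]
--         returnValue.add(sumValue)
--     return returnValue
-- ===== SOURCE B (Python) =====
-- def makeValue(arr, i):
--     n = len(arr)
--     if i > n:
--         return set()
--     if i <= 0:
--         return {0}
--     v = 0
--     for x in reversed(arr[:i]):
--         v = v * 10 + x
--     out = {v}
--     p = 10 ** (i - 1)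
--     for a in range(n - i):
--         v = (v - arr[a]) // 10 + p * arr[a + i]
--         out.add(v)
--     return out
-- ===== Notes on version B (the rewrite author's own statement) =====
-- stated objective: faster
-- what changed: Instead of recomputing each window's weighted digit sum from scratch, B computes the first window once (Horner over the reversed prefix) and then slides the window, updating the value in O(1) per step via (v - arr[a]) // 10 + 10**(i-1) * arr[a+i].
import Mathlib
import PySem

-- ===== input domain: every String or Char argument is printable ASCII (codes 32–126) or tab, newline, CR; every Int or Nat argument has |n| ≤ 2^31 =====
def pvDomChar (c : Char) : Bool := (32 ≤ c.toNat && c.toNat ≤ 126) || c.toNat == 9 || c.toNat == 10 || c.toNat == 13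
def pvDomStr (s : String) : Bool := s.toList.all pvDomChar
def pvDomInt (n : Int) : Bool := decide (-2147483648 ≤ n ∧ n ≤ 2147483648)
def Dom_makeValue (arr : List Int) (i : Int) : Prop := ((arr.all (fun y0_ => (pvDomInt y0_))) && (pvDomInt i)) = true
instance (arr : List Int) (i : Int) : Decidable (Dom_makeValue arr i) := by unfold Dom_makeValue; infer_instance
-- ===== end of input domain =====

-- B replaces A's per-window digit sums by an incremental sliding-window update (one O(1) step per slide).

-- ===== PORT A =====
-- 'for v in range(0, b)' ported as the obvious structural recursion over the trip count
-- (b - 0).toNat, folding the loop body over v = 0, 1, …; exact: same steps, same state.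
def pyFor {sig : Type} (f : sig -> Int -> sig) : Nat -> Int -> sig -> sig
  | 0, _, s => s
  | n + 1, a, s => pyFor f n (a + 1) (f s a)

def makeValue (arr : List Int) (i : Int) : List Int :=
  pyFor
    (fun ret a =>
      PySem.Set.add ret
        (pyFor (fun s j => s + 10 ^ j.toNat * PySem.List.pyGetD arr (a + j) 0) i.toNat 0 0))
    ((arr.length : Int) - i + 1).toNat 0 PySem.Set.empty

-- ===== PORT B =====
def makeValue_alt (arr : List Int) (i : Int) : List Int :=
  if (arr.length : Int) < i then PySem.Set.empty
  else if i ≤ 0 then PySem.Set.add PySem.Set.empty 0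
  else
    let v0 := ((PySem.List.slice arr none (some i)).reverse).foldl (fun v x => v * 10 + x) 0
    let p : Int := 10 ^ (i - 1).toNat
    (pyFor
      (fun (st : List Int × Int) a =>
        let nv := PySem.Int.floordiv (st.2 - PySem.List.pyGetD arr a 0) 10
                    + p * PySem.List.pyGetD arr (a + i) 0
        (PySem.Set.add st.1 nv, nv))
      ((arr.length : Int) - i).toNat 0 (PySem.Set.add PySem.Set.empty v0, v0)).1

-- ===== PRECONDITION & SPEC =====
def Spec_makeValue (arr : List Int) (i : Int) (out : List Int) : Prop := out = makeValue_alt arr i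
instance (arr : List Int) (i : Int) (out : List Int) : Decidable (Spec_makeValue arr i out) := by unfold Spec_makeValue; infer_instance

-- ===== CLAIM (what is proved, stated in full; the proofs are below) =====
def Claim_equal_makeValue : Prop := ∀ (arr : List Int) (i : Int), Dom_makeValue arr i → Spec_makeValue arr i (makeValue arr i)

-- ===== LEMMAS AND PROOFS =====

theorem pyFor_eq {sig : Type} (f : sig -> Int -> sig) :
    ∀ (n : Nat) (a : Int) (s : sig),
      pyFor f n a s = (PySem.List.pyRange a (a + (n : Int)) 1).foldl f s := by
  intro n
  induction n with
  | zero =>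
    intro a s
    rw [show a + ((0 : Nat) : Int) = a by push_cast; ring,
      PySem.List.pyRange_one_eq_nil (le_refl a)]
    rfl
  | succ n ih =>
    intro a s
    rw [show a + ((n + 1 : Nat) : Int) = (a + 1) + (n : Int) by push_cast; ring]
    rw [show pyFor f (n + 1) a s = pyFor f n (a + 1) (f s a) from rfl, ih,
      PySem.List.pyRange_one_cons (show a < a + 1 + (n : Int) by
        have : (0 : Int) ≤ (n : Int) := Int.natCast_nonneg n
        omega),
      List.foldl_cons]

theorem fold_zero_aux : ∀ (M : Nat) (a : Int),
    pyFor (fun (ret : List Int) (_ : Int) => PySem.Set.add ret 0) M a [0] = [0] := by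
  intro M
  induction M with
  | zero => intro a; rfl
  | succ M ih => intro a; exact ih (a + 1)

theorem fold_zero (M : Nat) (a : Int) :
    pyFor (fun (ret : List Int) (_ : Int) => PySem.Set.add ret 0) (M + 1) a PySem.Set.empty
      = [0] := by
  exact fold_zero_aux M (a + 1)

-- the value of the window of length k starting at a (total via getD)
def wv (arr : List Int) (k a : Nat) : Int :=
  ((List.range k).map (fun j => 10 ^ j * arr.getD (a + j) 0)).sum

theorem wv_snoc (arr : List Int) (m a : Nat) :
    wv arr (m + 1) a = wv arr m a + 10 ^ m * arr.getD (a + m) 0 := by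
  simp [wv, List.range_succ]

theorem wv_cons (arr : List Int) (m a : Nat) :
    wv arr (m + 1) a = arr.getD a 0 + 10 * wv arr m (a + 1) := by
  induction m with
  | zero => simp [wv, List.range_succ]
  | succ m ih =>
    rw [wv_snoc, ih, wv_snoc]
    have h : a + 1 + m = a + (m + 1) := by omega
    rw [h]; ring

theorem wv_step (arr : List Int) (k a : Nat) (hk : 1 ≤ k) :
    PySem.Int.floordiv (wv arr k a - arr.getD a 0) 10 + 10 ^ (k - 1) * arr.getD (a + k) 0
      = wv arr k (a + 1) := by
  obtain ⟨m, rfl⟩ : ∃ m, k = m + 1 := ⟨k - 1, by omega⟩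
  rw [wv_cons]
  have h1 : arr.getD a 0 + 10 * wv arr m (a + 1) - arr.getD a 0 = 10 * wv arr m (a + 1) := by ring
  rw [h1, PySem.Int.floordiv_eq_ediv_of_pos (by norm_num),
    Int.mul_ediv_cancel_left _ (by norm_num)]
  simp only [Nat.add_sub_cancel]
  rw [wv_snoc]
  have h2 : a + 1 + m = a + (m + 1) := by omega
  rw [h2]

theorem ofList_snoc (l : List Int) (x : Int) :
    PySem.Set.ofList (l ++ [x]) = PySem.Set.add (PySem.Set.ofList l) x := by
  simp [PySem.Set.ofList_eq_foldl, List.foldl_append]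

theorem wv_tail (x : Int) (t : List Int) (k a : Nat) : wv (x :: t) k (a + 1) = wv t k a := by
  unfold wv
  congr 1
  apply List.map_congr_left
  intro j hj
  have h : a + 1 + j = (a + j) + 1 := by omega
  rw [h, List.getD_cons_succ]

theorem wv_take (arr : List Int) (k : Nat) : wv (arr.take k) k 0 = wv arr k 0 := by
  unfold wv
  congr 1
  apply List.map_congr_left
  intro j hj
  rw [List.mem_range] at hj
  congr 1
  simp only [Nat.zero_add]
  rw [List.getD_eq_getElem?_getD, List.getD_eq_getElem?_getD, List.getElem?_take_of_lt hj]

theorem horner (l : List Int) :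
    l.reverse.foldl (fun v x => v * 10 + x) 0 = wv l l.length 0 := by
  induction l with
  | nil => rfl
  | cons x t ih =>
    simp only [List.reverse_cons, List.foldl_append, List.foldl_cons, List.foldl_nil, ih,
      List.length_cons]
    rw [wv_cons]
    have h := wv_tail x t t.length 0
    rw [Nat.zero_add] at h
    rw [h, List.getD_cons_zero]
    ring

theorem innerA_nat (arr : List Int) (a k : Nat) :
    (PySem.List.pyRange 0 (k : Int) 1).foldl
      (fun s j => s + 10 ^ j.toNat * PySem.List.pyGetD arr ((a : Int) + j) 0) 0
      = wv arr k a := by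
  induction k with
  | zero =>
    rw [show ((0 : Nat) : Int) = 0 from rfl, PySem.List.pyRange_one_eq_nil (le_refl 0)]
    rfl
  | succ k ih =>
    have hcast : ((k + 1 : Nat) : Int) = (k : Int) + 1 := by push_cast; ring
    rw [hcast, PySem.List.pyRange_one_succ_right (Int.natCast_nonneg k), List.foldl_append, ih,
      List.foldl_cons, List.foldl_nil]
    have h2 : (a : Int) + (k : Int) = ((a + k : Nat) : Int) := by push_cast; ring
    rw [h2, PySem.List.pyGetD_natCast]
    have h3 : ((k : Int)).toNat = k := by omega
    rw [h3, wv_snoc]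

theorem A_char (arr : List Int) (k m : Nat) :
    (PySem.List.pyRange 0 (m : Int) 1).foldl
      (fun ret a =>
        PySem.Set.add ret
          ((PySem.List.pyRange 0 (k : Int) 1).foldl
            (fun s j => s + 10 ^ j.toNat * PySem.List.pyGetD arr (a + j) 0) 0))
      PySem.Set.empty
      = PySem.Set.ofList ((List.range m).map (wv arr k)) := by
  induction m with
  | zero =>
    rw [show ((0 : Nat) : Int) = 0 from rfl, PySem.List.pyRange_one_eq_nil (le_refl 0)]
    rfl
  | succ m ih =>
    have hcast : ((m + 1 : Nat) : Int) = (m : Int) + 1 := by push_cast; ring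
    rw [hcast, PySem.List.pyRange_one_succ_right (Int.natCast_nonneg m), List.foldl_append, ih,
      List.foldl_cons, List.foldl_nil, innerA_nat arr m k,
      List.range_succ, List.map_append, List.map_cons, List.map_nil, ofList_snoc]

theorem B_char (arr : List Int) (k m : Nat) (hk : 1 ≤ k) :
    ((PySem.List.pyRange 0 (m : Int) 1).foldl
      (fun (st : List Int × Int) a =>
        (PySem.Set.add st.1
          (PySem.Int.floordiv (st.2 - PySem.List.pyGetD arr a 0) 10
            + 10 ^ ((k : Int) - 1).toNat * PySem.List.pyGetD arr (a + (k : Int)) 0),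
         PySem.Int.floordiv (st.2 - PySem.List.pyGetD arr a 0) 10
            + 10 ^ ((k : Int) - 1).toNat * PySem.List.pyGetD arr (a + (k : Int)) 0))
      (PySem.Set.add PySem.Set.empty (wv arr k 0), wv arr k 0))
      = (PySem.Set.ofList ((List.range (m + 1)).map (wv arr k)), wv arr k m) := by
  induction m with
  | zero =>
    rw [show ((0 : Nat) : Int) = 0 from rfl, PySem.List.pyRange_one_eq_nil (le_refl 0)]
    rfl
  | succ m ih =>
    have hcast : ((m + 1 : Nat) : Int) = (m : Int) + 1 := by push_cast; ring
    rw [hcast, PySem.List.pyRange_one_succ_right (Int.natCast_nonneg m), List.foldl_append, ih,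
      List.foldl_cons, List.foldl_nil]
    have hgm : PySem.List.pyGetD arr ((m : Nat) : Int) 0 = arr.getD m 0 :=
      PySem.List.pyGetD_natCast arr m 0
    have hgmi : ((m : Nat) : Int) + (k : Int) = ((m + k : Nat) : Int) := by push_cast; ring
    have h1 : ((k : Int) - 1).toNat = k - 1 := by omega
    have hNV : PySem.Int.floordiv (wv arr k m - PySem.List.pyGetD arr ((m : Nat) : Int) 0) 10
        + 10 ^ ((k : Int) - 1).toNat * PySem.List.pyGetD arr (((m : Nat) : Int) + (k : Int)) 0
        = wv arr k (m + 1) := by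
      rw [hgm, hgmi, PySem.List.pyGetD_natCast, h1]
      exact wv_step arr k m hk
    dsimp only
    rw [hNV,
      show List.range (m + 1 + 1) = List.range (m + 1) ++ [m + 1] from List.range_succ,
      List.map_append, List.map_cons, List.map_nil, ofList_snoc,
      show List.range (m + 1) = List.range m ++ [m] from List.range_succ,
      List.map_append, List.map_cons, List.map_nil, ofList_snoc]

theorem AB (arr : List Int) (i : Int) : makeValue arr i = makeValue_alt arr i := by
  unfold makeValue makeValue_alt
  by_cases h1 : (arr.length : Int) < i
  · rw [if_pos h1, show ((arr.length : Int) - i + 1).toNat = 0 from by omega]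
    rfl
  · rw [if_neg h1]
    by_cases h2 : i ≤ 0
    · rw [if_pos h2, show i.toNat = 0 from by omega]
      simp only [pyFor]
      obtain ⟨M, hM⟩ : ∃ M, ((arr.length : Int) - i + 1).toNat = M + 1 :=
        ⟨((arr.length : Int) - i + 1).toNat - 1, by omega⟩
      rw [hM]
      have hadd : PySem.Set.add PySem.Set.empty (0 : Int) = [0] := by decide
      rw [hadd]
      exact fold_zero M 0
    · rw [if_neg h2]
      obtain ⟨k, rfl⟩ : ∃ k : Nat, i = (k : Int) := ⟨i.toNat, by omega⟩
      have hk1 : 1 ≤ k := by omega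
      have hkn : k ≤ arr.length := by omega
      dsimp only
      rw [show ((k : Nat) : Int).toNat = k from by omega,
        show ((arr.length : Int) - (k : Int) + 1).toNat = arr.length - k + 1 from by omega,
        show ((arr.length : Int) - (k : Int)).toNat = arr.length - k from by omega]
      simp only [pyFor_eq, zero_add]
      have hv0 : ((PySem.List.slice arr none (some ((k : Nat) : Int))).reverse).foldl
          (fun v x => v * 10 + x) 0 = wv arr k 0 := by
        rw [PySem.List.slice_to_natCast, horner, List.length_take, min_eq_left hkn, wv_take]
      rw [hv0, A_char arr k (arr.length - k + 1), B_char arr k (arr.length - k) hk1]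

-- ===== VERDICT (by name: the statement is the Claim_ definition above) =====
theorem makeValue_spec : Claim_equal_makeValue := by
  intro arr i _
  unfold Spec_makeValue
  exact AB arr i
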